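-- pv_equiv track=rewrite | github.com/Amborsia/BaekjoonHub | 프로그래머스/2/12981. 영어 끝말잇기/영어 끝말잇기.py | solution
-- ===== SOURCE A (Python) =====
-- def solution(n, words):
--     used = set()
--     result = words[0][0]
--
--     for i, word in enumerate(words):
--         person = (i%n)+1
--         turn = (i//n)+1
--
--         if word in used or word[0] != result:
--             return [person, turn]
--         used.add(word)
--         result = word[-1]
--
--     return [0, 0]
-- ===== SOURCE B (Python) =====
-- def solution(n, words):
--     # Pass 1: earliest index whose word already occurred earlier.
--     seen = set()
--     dup = None
--     for i, w in enumerate(words):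
--         if w in seen:
--             dup = i
--             break
--         seen.add(w)
--
--     # Pass 2: earliest index i >= 1 breaking the chain rule (slice form, total on empty words).
--     brk = None
--     for i, (prev, cur) in enumerate(zip(words, words[1:]), 1):
--         if cur[:1] != prev[-1:]:
--             brk = i
--             break
--
--     cands = [x for x in (dup, brk) if x is not None]
--     if not cands:
--         return [0, 0]
--     i = min(cands)
--     return [(i % n) + 1, (i // n) + 1]
-- ===== Notes on version B (the rewrite author's own statement) =====
-- stated objective: alternative
-- what changed: Replaced A's single fused loop carrying a set and a running last-letter with two independent passes (earliest-duplicate scan with a seen-set; earliest chain-break scan over consecutive pairs using the total slices w[:1]/w[-1:]) whose found indices are combined by min.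
import Mathlib
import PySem

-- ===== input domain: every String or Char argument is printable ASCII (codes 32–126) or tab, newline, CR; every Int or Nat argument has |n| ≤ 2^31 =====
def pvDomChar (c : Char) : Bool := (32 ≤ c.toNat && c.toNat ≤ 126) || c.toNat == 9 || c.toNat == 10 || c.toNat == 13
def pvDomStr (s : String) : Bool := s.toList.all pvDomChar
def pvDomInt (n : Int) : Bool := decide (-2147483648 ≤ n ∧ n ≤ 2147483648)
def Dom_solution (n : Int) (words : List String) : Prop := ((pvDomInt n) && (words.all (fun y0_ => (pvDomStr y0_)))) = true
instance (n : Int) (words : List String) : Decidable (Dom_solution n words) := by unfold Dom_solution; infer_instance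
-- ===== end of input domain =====

-- B replaces A's single fused loop by two independent passes (earliest duplicate; earliest
-- chain break over consecutive pairs, in total slice form) combined by min of the found indices:
-- same cost, a different decomposition.

-- ===== PORT A =====
-- the fused loop: `used` is the Python set, `result` the running last letter (none only where Python raises)
def solutionGo (n : Int) (pairs : List (Int × String)) (used : PySem.Set String)
    (result : Option Char) : List Int :=
  match pairs with
  | [] => [0, 0]
  | (i, word) :: rest =>
    let person := PySem.Int.mod i n + 1
    let turn := PySem.Int.floordiv i n + 1
    if PySem.Set.contains used word || decide (PySem.Str.pyGet? word 0 ≠ result) then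
      [person, turn]
    else
      solutionGo n rest (PySem.Set.add used word) (PySem.Str.pyGet? word (-1))

def solution (n : Int) (words : List String) : List Int :=
  match words with
  | [] => []  -- words[0] raises IndexError in Python (excluded by Pre_)
  | w :: _ =>
    -- result = words[0][0]; inputs on which Python A raises are excluded by Pre_
    solutionGo n (PySem.List.enumerate words 0) PySem.Set.empty (PySem.Str.pyGet? w 0)

-- ===== PORT B =====
-- Pass 1: earliest index whose word already occurred earlier
def findDup (ws : List String) (i : Int) (seen : PySem.Set String) : Option Int :=
  match ws with
  | [] => none
  | w :: rest =>
    if PySem.Set.contains seen w then some i else findDup rest (i + 1) (PySem.Set.add seen w)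

-- Pass 2: earliest index i ≥ 1 with cur[:1] ≠ prev[-1:], scanning consecutive pairs
def findBreak (ws : List String) (i : Int) : Option Int :=
  match ws with
  | prev :: cur :: rest =>
    if decide (PySem.Str.slice cur none (some 1) ≠ PySem.Str.slice prev (some (-1)) none) then some i
    else findBreak (cur :: rest) (i + 1)
  | _ => none

-- min of the candidates that were found
def minOpt : Option Int → Option Int → Option Int
  | none, b => b
  | a, none => a
  | some a, some b => some (min a b)

def solution_alt (n : Int) (words : List String) : List Int :=
  match minOpt (findDup words 0 PySem.Set.empty) (findBreak words 1) with
  | none => [0, 0]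
  | some i => [PySem.Int.mod i n + 1, PySem.Int.floordiv i n + 1]

-- ===== PRECONDITION & SPEC =====
-- an offense at index j: the word already occurred, or (j ≥ 1 and) its first letter differs
-- from the previous word's last letter (slice form, total on empty words)
def pvOffense (words : List String) (j : Nat) : Bool :=
  decide (words.getD j "" ∈ words.take j) ||
    (decide (1 ≤ j) &&
      decide (PySem.Str.slice (words.getD j "") none (some 1) ≠
              PySem.Str.slice (words.getD (j - 1) "") (some (-1)) none))

-- Pre_ admits exactly the inputs on which Python A returns: it excludes n = 0 (ZeroDivisionError
-- at i % n), empty `words` (IndexError at words[0]) and any empty word not preceded by an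
-- earlier offense (IndexError at word[0] when A reaches it); on every other input A returns.
def Pre_solution (n : Int) (words : List String) : Prop :=
  n ≠ 0 ∧ words ≠ [] ∧
    ∀ i ∈ List.range words.length, words.getD i "" = "" →
      ∃ j ∈ List.range i, pvOffense words j = true
instance (n : Int) (words : List String) : Decidable (Pre_solution n words) := by
  unfold Pre_solution; infer_instance

def pvWitness_solution : Int × List String := (2, ["ab", "ba", "ac"])

def Spec_solution (n : Int) (words : List String) (out : List Int) : Prop := out = solution_alt n words
instance (n : Int) (words : List String) (out : List Int) : Decidable (Spec_solution n words out) := by unfold Spec_solution; infer_instance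

-- ===== CLAIM (what is proved, stated in full; the proofs are below) =====
def Claim_equal_solution : Prop := ∀ (n : Int) (words : List String), Dom_solution n words → Pre_solution n words → Spec_solution n words (solution n words)

-- ===== LEMMAS AND PROOFS =====

-- B's slice comparison coincides with A's character comparison, on every pair of strings
lemma slice_cmp_eq (s t : String) :
    (PySem.Str.slice s none (some 1) = PySem.Str.slice t (some (-1)) none)
      ↔ (PySem.Str.pyGet? s 0 = PySem.Str.pyGet? t (-1)) := by
  rw [← String.toList_inj]
  simp only [PySem.Str.toList_slice, PySem.Chars.slice_eq_listSlice,
    PySem.Str.pyGet?_eq, PySem.Chars.pyGet?_eq_listPyGet?]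
  rw [show ((1:Int)) = ((1:Nat):Int) from rfl, PySem.List.slice_to_natCast,
      PySem.List.slice_from_neg_natCast _ _ (by norm_num)]
  rcases hs : s.toList with _ | ⟨a, l⟩ <;>
    rcases List.eq_nil_or_concat t.toList with ht | ⟨m, b, ht⟩ <;>
    simp [ht, PySem.List.pyGet?, PySem.List.pyIdx?]

lemma findDup_ge (ws : List String) (k : Int) (seen : PySem.Set String) (i : Int)
    (h : findDup ws k seen = some i) : k ≤ i := by
  induction ws generalizing k seen with
  | nil => simp [findDup] at h
  | cons w rest ih =>
    rw [findDup] at h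
    split at h
    · cases h; omega
    · have := ih (k + 1) (PySem.Set.add seen w) h; omega

-- A's chain check on the suffix, as a "first break from a given previous-last-letter" scan
def findBreakFrom (res : Option Char) (ws : List String) (k : Int) : Option Int :=
  match ws with
  | [] => none
  | w :: t =>
    if decide (PySem.Str.pyGet? w 0 ≠ res) then some k
    else findBreakFrom (PySem.Str.pyGet? w (-1)) t (k + 1)

lemma findBreak_eq_from (prev : String) (t : List String) (k : Int) :
    findBreak (prev :: t) k = findBreakFrom (PySem.Str.pyGet? prev (-1)) t k := by
  induction t generalizing prev k with
  | nil => simp [findBreak, findBreakFrom]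
  | cons cur rest ih =>
    rw [findBreak, findBreakFrom]
    have hc := slice_cmp_eq cur prev
    split <;> rename_i h <;> split <;> rename_i h' <;>
      simp_all [ih cur (k + 1)]

lemma findBreakFrom_ge (res : Option Char) (ws : List String) (k : Int) (i : Int)
    (h : findBreakFrom res ws k = some i) : k ≤ i := by
  induction ws generalizing res k with
  | nil => simp [findBreakFrom] at h
  | cons w rest ih =>
    rw [findBreakFrom] at h
    split at h
    · cases h; omega
    · have := ih _ (k + 1) h; omega

-- the joint invariant: A's fused loop equals min of the two scans rendered to the answer
lemma go_eq (n : Int) (rest : List String) (k : Int) (seen : PySem.Set String)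
    (res : Option Char) :
    solutionGo n (PySem.List.enumerate rest k) seen res =
      (match minOpt (findDup rest k seen) (findBreakFrom res rest k) with
       | none => [0, 0]
       | some i => [PySem.Int.mod i n + 1, PySem.Int.floordiv i n + 1]) := by
  induction rest generalizing k seen res with
  | nil => simp [PySem.List.enumerate_nil, solutionGo, findDup, findBreakFrom, minOpt]
  | cons w t ih =>
    rw [PySem.List.enumerate_cons]
    by_cases hd : w ∈ seen
    · by_cases hb : PySem.List.pyGet? w.toList 0 = res
      · cases hfb : findBreakFrom (PySem.List.pyGet? w.toList (-1)) t (k + 1) with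
        | none => simp [solutionGo, findDup, findBreakFrom, minOpt, hd, hb, hfb]
        | some j =>
          have hj := findBreakFrom_ge _ _ _ _ hfb
          have hmin : min k j = k := by omega
          simp [solutionGo, findDup, findBreakFrom, minOpt, hd, hb, hfb, hmin]
      · simp [solutionGo, findDup, findBreakFrom, minOpt, hd, hb]
    · by_cases hb : PySem.List.pyGet? w.toList 0 = res
      · have hrec := ih (k + 1) (PySem.Set.add seen w) (PySem.Str.pyGet? w (-1))
        simp only [PySem.Set.add] at hrec
        simp [solutionGo, findDup, findBreakFrom, hd, hb] at hrec ⊢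
        exact hrec
      · cases hfd : findDup t (k + 1) (PySem.Set.add seen w) with
        | none =>
          simp only [PySem.Set.add] at hfd
          simp [solutionGo, findDup, findBreakFrom, minOpt, hd, hb] at hfd ⊢
          simp [hfd]
        | some j =>
          have hj := findDup_ge _ _ _ _ hfd
          have hmin : min j k = k := by omega
          simp only [PySem.Set.add] at hfd
          simp [solutionGo, findDup, findBreakFrom, minOpt, hd, hb] at hfd ⊢
          simp [hfd, hmin]

-- ===== VERDICT (by name: the statements are the Claim_ definitions above) =====
theorem solution_spec : Claim_equal_solution := by
  intro n words _ hpre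
  unfold Spec_solution
  obtain ⟨-, hne, -⟩ := hpre
  cases words with
  | nil => exact absurd rfl hne
  | cons w t =>
    have hL : solution n (w :: t) =
        solutionGo n (PySem.List.enumerate (w :: t) 0) PySem.Set.empty (PySem.Str.pyGet? w 0) := rfl
    have hR : solution_alt n (w :: t) =
        (match minOpt (findDup (w :: t) 0 PySem.Set.empty) (findBreak (w :: t) 1) with
         | none => [0, 0]
         | some i => [PySem.Int.mod i n + 1, PySem.Int.floordiv i n + 1]) := rfl
    show solution n (w :: t) = solution_alt n (w :: t)
    rw [hL, hR, go_eq, findBreak_eq_from]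
    simp [findDup, findBreakFrom]
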